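-- pv_equiv track=rewrite | github.com/mzivic7/SyncTEd | syncted/editor.py | up_arrow
-- ===== SOURCE A (Python) =====
-- def locate_newline(text):
--     """Finds locations of all newlines in text"""
--     location = 0
--     loc_prev = 0
--     newline_loc = []   # location of newline signs
--     while location != -1:
--         location = text.find(" /n ", loc_prev)   # find location of "/n" from previous one
--         loc_prev = location + 4   # location of previous "/n" without it
--         if location != -1:   # if there is found "/n"
--             newline_loc.append(location)  # append it to list
--     return newline_loc
--
-- def up_arrow(text, i):
--     """UP arrow"""
--     closest_newline = 0
--     second_closest = 0
--     newline_loc = locate_newline(text)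
--     for newline in newline_loc:
--         if newline < i:
--             second_closest = closest_newline   # second closest to left is previous closest
--             closest_newline = newline    # closest newline to left
--     # if there is closest newline
--     if closest_newline != 0:
--         # if index location on current line is greater than length of above line:
--         if closest_newline - second_closest - 4 < i - closest_newline - 4:
--             if second_closest == 0:   # if above line is first one there is offset by 4 in detection
--                 if closest_newline - second_closest < i - closest_newline - 4:   # here
--                     i = closest_newline   # go to end of above line
--                 else:
--                     i -= closest_newline - second_closest   # go to same location but on above line
--                     if second_closest == 0:
--                         i -= 4   # if it is on first line add 4 to skip "/n" sign
--             else: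
--                 i = closest_newline   # go to end of above line
--         else:
--             i -= closest_newline - second_closest   # go to same location but on above line
--             if second_closest == 0:
--                 i -= 4   # if it is on first line add 4 to skip "/n" sign
--     return i
-- ===== SOURCE B (Python) =====
-- def up_arrow(text, i):
--     """UP arrow"""
--     # Single streaming scan: track the last two " /n " positions before i,
--     # stopping as soon as a position reaches i (no list of all newlines).
--     second = 0
--     closest = 0
--     pos = text.find(" /n ")
--     while pos != -1 and pos < i:
--         second, closest = closest, pos
--         pos = text.find(" /n ", pos + 4)
--     if closest == 0:
--         return i
--     if second == 0:
--         # previous line is the first line (no leading " /n " marker)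
--         return closest if closest < i - closest - 4 else i - closest - 4
--     return closest if closest - second < i - closest else i - (closest - second)
-- ===== Notes on version B (the rewrite author's own statement) =====
-- stated objective: simpler
-- what changed: B replaces locate_newline's build-a-list-of-all-newlines-then-rescan with a single streaming find loop that keeps only the last two " /n " positions and stops at the first one >= i, and flattens A's nested sentinel branch block into three direct return expressions.
import Mathlib
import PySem

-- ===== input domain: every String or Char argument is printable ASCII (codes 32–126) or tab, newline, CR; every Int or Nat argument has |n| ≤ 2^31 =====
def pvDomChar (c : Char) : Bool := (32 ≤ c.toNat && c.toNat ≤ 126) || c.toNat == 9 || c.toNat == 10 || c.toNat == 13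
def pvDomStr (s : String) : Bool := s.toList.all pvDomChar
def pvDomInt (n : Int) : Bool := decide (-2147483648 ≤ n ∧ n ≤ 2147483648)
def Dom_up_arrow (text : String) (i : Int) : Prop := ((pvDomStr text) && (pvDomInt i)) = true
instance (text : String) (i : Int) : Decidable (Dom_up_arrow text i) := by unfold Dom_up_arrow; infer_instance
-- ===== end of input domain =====

-- B replaces A's build-a-list-of-all-newlines-then-rescan with one streaming scan keeping the
-- last two " /n " positions (early exit at the cursor) and a flattened branch block; return value only.

-- Termination helper for the find loops: a hit at q means p ≤ q and q+4 ≤ length.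
theorem pv_find_step (cs : List Char) (p : Nat) (hp : p ≤ cs.length)
    (h : PySem.Chars.findFrom cs " /n ".toList (p : Int) none ≠ -1) :
    (p : Int) ≤ PySem.Chars.findFrom cs " /n ".toList (p : Int) none ∧
    (PySem.Chars.findFrom cs " /n ".toList (p : Int) none).toNat + 4 ≤ cs.length := by
  obtain ⟨h1, h2, _⟩ := PySem.Chars.findFrom_natCast_spec cs " /n ".toList p hp h
  refine ⟨h1, ?_⟩
  have hlen := h2.length_le
  rw [List.length_drop] at hlen
  have h4 : (" /n ".toList).length = 4 := rfl
  omega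

-- ===== PORT A =====
-- locate_newline's while loop: the start index is always a nonnegative in-range value, carried
-- as a Nat with its bound so the recursion terminates (values produced are the same Python ints).
def locateLoop (cs : List Char) (p : Nat) (hp : p ≤ cs.length) : List Int :=
  let location := PySem.Chars.findFrom cs " /n ".toList (p : Int) none
  if h : location = -1 then []
  else location :: locateLoop cs (location.toNat + 4) (pv_find_step cs p hp h).2
termination_by cs.length - p
decreasing_by
  have := pv_find_step cs p hp h
  omega

def locate_newline (cs : List Char) : List Int := locateLoop cs 0 (Nat.zero_le _)

def up_arrow (text : String) (i : Int) : Int :=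
  let newline_loc := locate_newline text.toList
  let sc := newline_loc.foldl
    (fun (sc : Int × Int) newline => if newline < i then (sc.2, newline) else sc)
    ((0 : Int), (0 : Int))
  let second_closest := sc.1
  let closest_newline := sc.2
  if closest_newline ≠ 0 then
    if closest_newline - second_closest - 4 < i - closest_newline - 4 then
      if second_closest = 0 then
        if closest_newline - second_closest < i - closest_newline - 4 then
          closest_newline
        else
          if second_closest = 0 then i - (closest_newline - second_closest) - 4
          else i - (closest_newline - second_closest)
      else closest_newline
    else
      if second_closest = 0 then i - (closest_newline - second_closest) - 4
      else i - (closest_newline - second_closest)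
  else i

-- ===== PORT B =====
-- B's while loop: streams over " /n " hits, keeping (second, closest), stopping at -1 or ≥ i.
def bScan (cs : List Char) (i : Int) (second closest : Int) (p : Nat) (hp : p ≤ cs.length) :
    Int × Int :=
  let pos := PySem.Chars.findFrom cs " /n ".toList (p : Int) none
  if h : pos = -1 ∨ ¬ pos < i then (second, closest)
  else bScan cs i closest pos (pos.toNat + 4)
    (pv_find_step cs p hp (not_or.mp h).1).2
termination_by cs.length - p
decreasing_by
  have := pv_find_step cs p hp (not_or.mp h).1
  omega

def up_arrow_alt (text : String) (i : Int) : Int :=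
  let sc := bScan text.toList i 0 0 0 (Nat.zero_le _)
  let second := sc.1
  let closest := sc.2
  if closest = 0 then i
  else if second = 0 then
    if closest < i - closest - 4 then closest else i - closest - 4
  else
    if closest - second < i - closest then closest else i - (closest - second)

-- ===== PRECONDITION & SPEC =====
def Spec_up_arrow (text : String) (i : Int) (out : Int) : Prop := out = up_arrow_alt text i
instance (text : String) (i : Int) (out : Int) : Decidable (Spec_up_arrow text i out) := by unfold Spec_up_arrow; infer_instance

-- ===== CLAIM (what is proved, stated in full; the proofs are below) =====
def Claim_equal_up_arrow : Prop := ∀ (text : String) (i : Int), Dom_up_arrow text i → Spec_up_arrow text i (up_arrow text i)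

-- ===== LEMMAS AND PROOFS =====

-- every element of locateLoop cs p is ≥ p
theorem locateLoop_ge (cs : List Char) (p : Nat) (hp : p ≤ cs.length) :
    ∀ x ∈ locateLoop cs p hp, (p : Int) ≤ x := by
  intro x hx
  rw [locateLoop] at hx
  split at hx
  · simp at hx
  · rename_i h
    rcases List.mem_cons.mp hx with rfl | hx
    · exact (pv_find_step cs p hp h).1
    · have hstep := pv_find_step cs p hp h
      have := locateLoop_ge cs _ hstep.2 x hx
      omega
termination_by cs.length - p
decreasing_by
  have := pv_find_step cs p hp (by assumption)
  omega

-- folding the update over a list with no element < i changes nothing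
theorem foldl_no_update (i : Int) (L : List Int) (sc : Int × Int)
    (h : ∀ x ∈ L, ¬ x < i) :
    L.foldl (fun (sc : Int × Int) n => if n < i then (sc.2, n) else sc) sc = sc := by
  induction L generalizing sc with
  | nil => rfl
  | cons a L ih =>
    simp only [List.foldl_cons]
    rw [if_neg (h a (List.mem_cons_self))]
    exact ih sc fun x hx => h x (List.mem_cons_of_mem a hx)

-- the fold over A's full list equals B's early-exit scan, from any start and accumulator
theorem foldl_eq_bScan (cs : List Char) (i : Int) (p : Nat) (hp : p ≤ cs.length)
    (s c : Int) :
    (locateLoop cs p hp).foldl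
      (fun (sc : Int × Int) n => if n < i then (sc.2, n) else sc) (s, c)
    = bScan cs i s c p hp := by
  rw [locateLoop, bScan]
  split
  · rename_i h
    rw [dif_pos (Or.inl h)]
    rfl
  · rename_i h
    by_cases hlt : PySem.Chars.findFrom cs " /n ".toList (p : Int) none < i
    · rw [dif_neg (not_or.mpr ⟨h, not_not_intro hlt⟩)]
      simp only [List.foldl_cons, if_pos hlt]
      exact foldl_eq_bScan cs i _ _ c _
    · rw [dif_pos (Or.inr hlt)]
      simp only [List.foldl_cons, if_neg hlt]
      apply foldl_no_update
      intro x hx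
      have hge := locateLoop_ge cs _ _ x hx
      have hstep := pv_find_step cs p hp h
      omega
termination_by cs.length - p
decreasing_by
  have := pv_find_step cs p hp (by assumption)
  omega

-- ===== VERDICT (by name: the statement is the Claim_ definition above) =====
theorem up_arrow_spec : Claim_equal_up_arrow := by
  intro text i _
  unfold Spec_up_arrow up_arrow up_arrow_alt locate_newline
  simp only [foldl_eq_bScan]
  generalize bScan text.toList i 0 0 0 (Nat.zero_le _) = sc
  obtain ⟨s, c⟩ := sc
  simp only
  split_ifs <;> omega
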